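-- pv_equiv track=rewrite | github.com/LasseKohlmeyer/ma-doc-embeddings | common_words.py | global_common_words
-- ===== SOURCE A (Python) =====
-- from typing import Dict, List, Set
--
-- def global_common_words(doc_texts: Dict[str, List[str]]) -> Dict[str, Set[str]]:
--     tokens = [set(doc_tokens) for doc_id, doc_tokens in doc_texts.items()]
--
--     global_intersect = set()
--     for token_set_a in tokens:
--         for token_set_b in tokens:
--             if token_set_a != token_set_b:
--                 global_intersect.update(token_set_a.intersection(token_set_b))
--
--     global__strict_intersect = set.intersection(*tokens)
--
--     common_words = {}
--     for c, (doc_id, doc_tokens) in enumerate(doc_texts.items()):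
--         not_to_delete = set(doc_tokens).difference(global_intersect).union(global__strict_intersect)
--         to_delete = set(doc_tokens).difference(not_to_delete)
--         common_words[doc_id] = to_delete
--
--     return common_words
-- ===== SOURCE B (Python) =====
-- from typing import Dict, List, Set
--
--
-- def global_common_words(doc_texts: Dict[str, List[str]]) -> Dict[str, Set[str]]:
--     # Distinct token-set values (A compares sets by value, not identity).
--     distinct = []
--     for doc_tokens in doc_texts.values():
--         s = set(doc_tokens)
--         if s not in distinct:
--             distinct.append(s)
--
--     # freq[t] = number of distinct token-set values containing t.
--     freq = {}
--     for s in distinct: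
--         for t in s:
--             freq[t] = freq.get(t, 0) + 1
--
--     # t is deleted iff it occurs in >= 2 distinct sets (so it is in the pairwise
--     # intersection union) but not in all of them (the strict intersection).
--     n = len(distinct)
--     return {doc_id: {t for t in doc_tokens if 2 <= freq.get(t, 0) < n}
--             for doc_id, doc_tokens in doc_texts.items()}
-- ===== Notes on version B (the rewrite author's own statement) =====
-- stated objective: faster
-- what changed: A unions pairwise intersections over all ordered pairs of per-doc token sets and then set-subtracts per doc; B dedupes the token sets to their distinct values once, counts for each token how many distinct sets contain it, and keeps a token iff that count is >= 2 and below the number of distinct sets (i.e. in several but not all).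
import Mathlib
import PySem

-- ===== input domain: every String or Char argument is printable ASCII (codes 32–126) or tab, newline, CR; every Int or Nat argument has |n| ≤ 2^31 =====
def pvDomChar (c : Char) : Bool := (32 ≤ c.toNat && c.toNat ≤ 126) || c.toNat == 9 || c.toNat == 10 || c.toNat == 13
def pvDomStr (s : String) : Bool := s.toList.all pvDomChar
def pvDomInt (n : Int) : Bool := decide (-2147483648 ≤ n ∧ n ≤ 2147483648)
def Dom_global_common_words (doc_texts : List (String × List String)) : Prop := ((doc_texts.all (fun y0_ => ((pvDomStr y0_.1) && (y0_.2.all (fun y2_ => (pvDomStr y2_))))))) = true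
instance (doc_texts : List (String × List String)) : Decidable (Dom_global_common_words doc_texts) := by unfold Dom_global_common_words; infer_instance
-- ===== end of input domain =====

-- B replaces A's quadratic pairwise set-intersection scan by a per-token count over the
-- distinct token-set values (kept tokens: in ≥2 distinct sets but not in all); equivalence
-- is about the returned value (A mutates nothing).

-- ===== PORT A =====
-- the Python argument is a dict: normalise the association list with dict semantics
-- (first-occurrence key order, last value wins), shared by both ports as argument marshalling
def pvDict (doc_texts : List (String × List String)) : PySem.Dict String (List String) :=
  doc_texts.foldl (fun d p => d.insert p.1 p.2) PySem.Dict.empty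

-- `to_delete` for one doc (A's three lines inside the final loop)
def pvToDelete (gi si : PySem.Set String) (p : String × List String) : PySem.Set String :=
  let s := PySem.Set.ofList p.2
  PySem.Set.diff s (PySem.Set.union (PySem.Set.diff s gi) si)

-- tokens = [set(doc_tokens) for ...]
def pvTokens (items : List (String × List String)) : List (PySem.Set String) :=
  items.map (fun p => PySem.Set.ofList p.2)

-- A's nested loop building global_intersect
def pvGI (tokens : List (PySem.Set String)) : PySem.Set String :=
  tokens.foldl (fun acc a =>
    tokens.foldl (fun acc b =>
      if !PySem.Set.equal a b then PySem.Set.update acc (PySem.Set.inter a b) else acc) acc)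
    PySem.Set.empty

-- global__strict_intersect = set.intersection(*tokens)
def pvSI (tokens : List (PySem.Set String)) : PySem.Set String :=
  match tokens with
  | [] => PySem.Set.empty          -- Python raises TypeError here; excluded by Pre_
  | t0 :: rest => rest.foldl PySem.Set.inter t0

def global_common_words (doc_texts : List (String × List String)) : List (String × List String) :=
  let items := (pvDict doc_texts).items
  let tokens := pvTokens items
  let gi := pvGI tokens
  let si := pvSI tokens
  ((items.foldl (fun cw p => cw.insert p.1 (pvToDelete gi si p))
      (PySem.Dict.empty : PySem.Dict String (PySem.Set String))).items)

-- ===== PORT B =====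
-- B's dedup loop over the token-set values (`if s not in distinct: distinct.append(s)`)
def pvDistinct (items : List (String × List String)) : List (PySem.Set String) :=
  items.foldl (fun acc p =>
    let s := PySem.Set.ofList p.2
    if acc.any (fun u => PySem.Set.equal u s) then acc else acc ++ [s]) []

-- B's frequency dict: freq[t] = freq.get(t, 0) + 1 over every t of every distinct set
def pvFreq (distinct : List (PySem.Set String)) : PySem.Dict String Int :=
  distinct.foldl (fun d s => s.foldl (fun d t => d.insert t (d.getD t 0 + 1)) d)
    PySem.Dict.empty

def global_common_words_alt (doc_texts : List (String × List String)) : List (String × List String) :=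
  let items := (pvDict doc_texts).items
  let distinct := pvDistinct items
  let freq := pvFreq distinct
  let n : Int := distinct.length
  items.map (fun p =>
    (p.1, PySem.Set.ofList (p.2.filter
      (fun t => decide (2 ≤ freq.getD t 0) && decide (freq.getD t 0 < n)))))

-- ===== PRECONDITION & SPEC =====
-- Pre_ excludes only the empty dict, on which A raises TypeError (set.intersection with no arguments)
def Pre_global_common_words (doc_texts : List (String × List String)) : Prop := doc_texts ≠ []
instance (doc_texts : List (String × List String)) : Decidable (Pre_global_common_words doc_texts) := by unfold Pre_global_common_words; infer_instance
def pvWitness_global_common_words : (List (String × List String)) := [("a", ["x", "y"]), ("b", ["y"])]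

def Spec_global_common_words (doc_texts : List (String × List String)) (out : List (String × List String)) : Prop := out = global_common_words_alt doc_texts
instance (doc_texts : List (String × List String)) (out : List (String × List String)) : Decidable (Spec_global_common_words doc_texts out) := by unfold Spec_global_common_words; infer_instance

-- ===== CLAIM (what is proved, stated in full; the proofs are below) =====
def Claim_equal_global_common_words : Prop := ∀ (doc_texts : List (String × List String)), Dom_global_common_words doc_texts → Pre_global_common_words doc_texts → Spec_global_common_words doc_texts (global_common_words doc_texts)
-- ===== LEMMAS AND PROOFS =====

-- `equal` is reflexive / symmetric-free facts we need
lemma pv_equal_refl (s : PySem.Set String) : PySem.Set.equal s s = true := by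
  rw [PySem.Set.equal_iff]; intro x; rfl

-- membership in A's inner `global_intersect` loop over b
lemma pv_equal_false (a b : PySem.Set String) (h : ¬ PySem.Set.equal a b = true) :
    PySem.Set.equal a b = false := by
  revert h; cases PySem.Set.equal a b <;> simp

lemma pv_mem_gi_inner (a : PySem.Set String) (xs : List (PySem.Set String))
    (acc : PySem.Set String) (t : String) :
    t ∈ xs.foldl (fun acc b =>
        if !PySem.Set.equal a b then PySem.Set.update acc (PySem.Set.inter a b) else acc) acc ↔
      t ∈ acc ∨ ∃ b ∈ xs, ¬(PySem.Set.equal a b = true) ∧ t ∈ a ∧ t ∈ b := by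
  induction xs generalizing acc with
  | nil => simp
  | cons b xs ih =>
    simp only [List.foldl_cons]
    by_cases h : PySem.Set.equal a b = true
    · rw [h]
      simp only [Bool.not_true, Bool.false_eq_true, if_false]
      rw [ih]
      constructor
      · rintro (h' | ⟨c, hc, h3⟩)
        · exact Or.inl h'
        · exact Or.inr ⟨c, List.mem_cons_of_mem _ hc, h3⟩
      · rintro (h' | ⟨c, hc, hcne, h4⟩)
        · exact Or.inl h'
        · rcases List.mem_cons.mp hc with rfl | hc'
          · exact absurd h hcne
          · exact Or.inr ⟨c, hc', hcne, h4⟩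
    · rw [pv_equal_false a b h]
      simp only [Bool.not_false, if_true]
      rw [ih]
      constructor
      · rintro (h' | ⟨c, hc, h3⟩)
        · rcases (PySem.Set.mem_update acc _ t).mp h' with h'' | h''
          · exact Or.inl h''
          · have := (PySem.Set.mem_inter a b t).mp h''
            exact Or.inr ⟨b, List.mem_cons_self, h, this⟩
        · exact Or.inr ⟨c, List.mem_cons_of_mem _ hc, h3⟩
      · rintro (h' | ⟨c, hc, hcne, h4⟩)
        · exact Or.inl ((PySem.Set.mem_update acc _ t).mpr (Or.inl h'))
        · rcases List.mem_cons.mp hc with rfl | hc'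
          · exact Or.inl ((PySem.Set.mem_update acc _ t).mpr
              (Or.inr ((PySem.Set.mem_inter a c t).mpr h4)))
          · exact Or.inr ⟨c, hc', hcne, h4⟩

-- membership in A's `global_intersect`
lemma pv_mem_gi (tokens : List (PySem.Set String)) (ys : List (PySem.Set String))
    (acc : PySem.Set String) (t : String) :
    t ∈ ys.foldl (fun acc a =>
        tokens.foldl (fun acc b =>
          if !PySem.Set.equal a b then PySem.Set.update acc (PySem.Set.inter a b) else acc) acc) acc ↔
      t ∈ acc ∨ ∃ a ∈ ys, ∃ b ∈ tokens, ¬(PySem.Set.equal a b = true) ∧ t ∈ a ∧ t ∈ b := by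
  induction ys generalizing acc with
  | nil => simp
  | cons a ys ih =>
    simp only [List.foldl_cons]
    rw [ih, pv_mem_gi_inner]
    constructor
    · rintro ((h' | ⟨b, hb, h3⟩) | ⟨c, hc, h4⟩)
      · exact Or.inl h'
      · exact Or.inr ⟨a, List.mem_cons_self, b, hb, h3⟩
      · exact Or.inr ⟨c, List.mem_cons_of_mem _ hc, h4⟩
    · rintro (h' | ⟨c, hc, h4⟩)
      · exact Or.inl (Or.inl h')
      · rcases List.mem_cons.mp hc with rfl | hc'
        · exact Or.inl (Or.inr h4)
        · exact Or.inr ⟨c, hc', h4⟩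

-- membership in A's strict intersection
lemma pv_mem_si (xs : List (PySem.Set String)) (acc : PySem.Set String) (t : String) :
    t ∈ xs.foldl PySem.Set.inter acc ↔ t ∈ acc ∧ ∀ a ∈ xs, t ∈ a := by
  induction xs generalizing acc with
  | nil => simp
  | cons a xs ih =>
    simp only [List.foldl_cons]
    rw [ih]
    simp [PySem.Set.mem_inter]
    tauto

-- B's dedup loop: the accumulated list only grows
lemma pv_distinct_ext (xs : List (PySem.Set String)) (acc : List (PySem.Set String)) :
    ∀ u ∈ acc, u ∈ xs.foldl (fun acc s =>
      if acc.any (fun u => PySem.Set.equal u s) then acc else acc ++ [s]) acc := by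
  induction xs generalizing acc with
  | nil => simp
  | cons s xs ih =>
    intro u hu
    simp only [List.foldl_cons]
    split_ifs with h
    · exact ih acc u hu
    · exact ih (acc ++ [s]) u (List.mem_append_left _ hu)

-- every accumulated set comes from acc or the input
lemma pv_distinct_sub (xs : List (PySem.Set String)) (acc : List (PySem.Set String)) :
    ∀ u ∈ xs.foldl (fun acc s =>
      if acc.any (fun u => PySem.Set.equal u s) then acc else acc ++ [s]) acc,
      u ∈ acc ∨ u ∈ xs := by
  induction xs generalizing acc with
  | nil => simp
  | cons s xs ih =>
    intro u hu
    simp only [List.foldl_cons] at hu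
    split_ifs at hu with h
    · rcases ih acc u hu with h' | h' <;> simp [h']
    · rcases ih (acc ++ [s]) u hu with h' | h'
      · rcases List.mem_append.mp h' with h'' | h''
        · exact Or.inl h''
        · simp at h''; simp [h'']
      · simp [h']

-- every input set has an equal representative in the result
lemma pv_distinct_cover (xs : List (PySem.Set String)) (acc : List (PySem.Set String)) :
    ∀ a ∈ xs, ∃ u ∈ xs.foldl (fun acc s =>
      if acc.any (fun u => PySem.Set.equal u s) then acc else acc ++ [s]) acc,
      PySem.Set.equal u a = true := by
  induction xs generalizing acc with
  | nil => simp
  | cons s xs ih =>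
    intro a ha
    simp only [List.foldl_cons]
    rcases List.mem_cons.mp ha with rfl | ha'
    · split_ifs with h
      · obtain ⟨u, hu, hequ⟩ := List.any_eq_true.mp h
        exact ⟨u, pv_distinct_ext xs acc u hu, hequ⟩
      · exact ⟨a, pv_distinct_ext xs (acc ++ [a]) a (by simp), pv_equal_refl a⟩
    · split_ifs with h
      · exact ih acc a ha'
      · exact ih (acc ++ [s]) a ha'

-- the result is pairwise non-equal (as Python sets)
lemma pv_distinct_pairwise (xs : List (PySem.Set String)) (acc : List (PySem.Set String))
    (h : acc.Pairwise (fun u v => ¬(PySem.Set.equal u v = true))) :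
    (xs.foldl (fun acc s =>
      if acc.any (fun u => PySem.Set.equal u s) then acc else acc ++ [s]) acc).Pairwise
      (fun u v => ¬(PySem.Set.equal u v = true)) := by
  induction xs generalizing acc with
  | nil => exact h
  | cons s xs ih =>
    simp only [List.foldl_cons]
    split_ifs with hany
    · exact ih acc h
    · refine ih (acc ++ [s]) ?_
      rw [List.pairwise_append]
      refine ⟨h, List.pairwise_singleton _ _, ?_⟩
      intro u hu v hv
      rw [List.mem_singleton] at hv; subst hv
      intro hc
      exact hany (List.any_eq_true.mpr ⟨u, hu, hc⟩)

-- B's frequency dict counts occurrences over the distinct sets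
lemma pv_freq_getD (L : List (PySem.Set String)) (d : PySem.Dict String Int) (t : String) :
    (L.foldl (fun d s => s.foldl (fun d t => d.insert t (d.getD t 0 + 1)) d) d).getD t 0
      = d.getD t 0 + ((L.map (fun s => s.count t)).sum : Nat) := by
  induction L generalizing d with
  | nil => simp
  | cons s L ih =>
    simp only [List.foldl_cons, List.map_cons, List.sum_cons]
    rw [ih, PySem.Dict.getD_foldl_insert_add_one]
    push_cast
    ring

-- over Nodup sets, summing counts is counting containing sets
lemma pv_sum_count (L : List (PySem.Set String)) (t : String) (h : ∀ s ∈ L, List.Nodup s) :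
    (L.map (fun s => s.count t)).sum = L.countP (fun s => PySem.Set.contains s t) := by
  induction L with
  | nil => simp
  | cons s L ih =>
    simp only [List.map_cons, List.sum_cons, List.countP_cons]
    rw [ih (fun u hu => h u (List.mem_cons_of_mem _ hu))]
    by_cases hm : t ∈ s
    · rw [List.count_eq_one_of_mem (h s (List.mem_cons_self)) hm,
        (PySem.Set.contains_iff s t).mpr hm, if_pos rfl]
      omega
    · rw [List.count_eq_zero_of_not_mem hm]
      have hc : PySem.Set.contains s t = false := by
        revert hm
        cases hcc : PySem.Set.contains s t
        · intro _; rfl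
        · intro hm; exact absurd ((PySem.Set.contains_iff s t).mp hcc) hm
      rw [hc, if_neg (by simp)]
      omega

-- two distinct members satisfying p force countP ≥ 2
lemma pv_two_le_countP (l : List (PySem.Set String)) (p : PySem.Set String → Bool)
    (u v : PySem.Set String) (hu : u ∈ l) (hv : v ∈ l) (hne : u ≠ v)
    (hpu : p u = true) (hpv : p v = true) : 2 ≤ l.countP p := by
  obtain ⟨l₁, l₂, rfl⟩ := List.append_of_mem hu
  rcases List.mem_append.mp hv with h | h
  · obtain ⟨m₁, m₂, rfl⟩ := List.append_of_mem h
    simp [List.countP_append, List.countP_cons, hpu, hpv]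
    omega
  · rcases List.mem_cons.mp h with rfl | h'
    · exact absurd rfl hne
    · obtain ⟨m₁, m₂, rfl⟩ := List.append_of_mem h'
      simp [List.countP_append, List.countP_cons, hpu, hpv]
      omega

-- key equivalence: "in ≥ 2 pairwise-different token sets" = "contained in ≥ 2 distinct set values"
lemma pv_gi_count (tokens distinct : List (PySem.Set String))
    (hsub : ∀ u ∈ distinct, u ∈ tokens)
    (hcov : ∀ a ∈ tokens, ∃ u ∈ distinct, PySem.Set.equal u a = true)
    (hpw : distinct.Pairwise (fun u v => ¬(PySem.Set.equal u v = true))) (t : String) :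
    ((∃ a ∈ tokens, ∃ b ∈ tokens, ¬(PySem.Set.equal a b = true) ∧ t ∈ a ∧ t ∈ b) ↔
      2 ≤ distinct.countP (fun s => PySem.Set.contains s t)) := by
  constructor
  · rintro ⟨a, ha, b, hb, hab, hta, htb⟩
    obtain ⟨u, hu, hua⟩ := hcov a ha
    obtain ⟨v, hv, hvb⟩ := hcov b hb
    have htu : t ∈ u := ((PySem.Set.equal_iff u a).mp hua t).mpr hta
    have htv : t ∈ v := ((PySem.Set.equal_iff v b).mp hvb t).mpr htb
    have hneq : u ≠ v := by
      rintro rfl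
      apply hab
      rw [PySem.Set.equal_iff]
      intro x
      rw [← (PySem.Set.equal_iff u a).mp hua x, (PySem.Set.equal_iff u b).mp hvb x]
    exact pv_two_le_countP distinct _ u v hu hv hneq
      ((PySem.Set.contains_iff u t).mpr htu) ((PySem.Set.contains_iff v t).mpr htv)
  · intro h
    have hlen : 2 ≤ (distinct.filter (fun s => PySem.Set.contains s t)).length := by
      rw [← List.countP_eq_length_filter]; exact h
    have hpwf : (distinct.filter (fun s => PySem.Set.contains s t)).Pairwise
        (fun u v => ¬(PySem.Set.equal u v = true)) :=
      List.Pairwise.sublist List.filter_sublist hpw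
    obtain ⟨u, v, rest, hf⟩ : ∃ u v rest,
        distinct.filter (fun s => PySem.Set.contains s t) = u :: v :: rest := by
      rcases hfl : distinct.filter (fun s => PySem.Set.contains s t) with _ | ⟨u, l'⟩
      · rw [hfl] at hlen; exact absurd hlen (by simp)
      · rcases hfl2 : l' with _ | ⟨v, rest⟩
        · rw [hfl2] at hfl; rw [hfl] at hlen; exact absurd hlen (by simp)
        · rw [hfl2] at hfl; exact ⟨u, v, rest, rfl⟩
    have hu : u ∈ distinct.filter (fun s => PySem.Set.contains s t) := by
      rw [hf]; exact List.mem_cons_self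
    have hv : v ∈ distinct.filter (fun s => PySem.Set.contains s t) := by
      rw [hf]; exact List.mem_cons_of_mem _ List.mem_cons_self
    have huv : ¬(PySem.Set.equal u v = true) := by
      rw [hf] at hpwf
      exact (List.pairwise_cons.mp hpwf).1 v List.mem_cons_self
    refine ⟨u, hsub u (List.mem_of_mem_filter hu), v, hsub v (List.mem_of_mem_filter hv), huv,
      (PySem.Set.contains_iff u t).mp (List.mem_filter.mp hu).2,
      (PySem.Set.contains_iff v t).mp (List.mem_filter.mp hv).2⟩

-- "in every token set" = "contained in every distinct set value" = countP = length
lemma pv_si_count (tokens distinct : List (PySem.Set String))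
    (hsub : ∀ u ∈ distinct, u ∈ tokens)
    (hcov : ∀ a ∈ tokens, ∃ u ∈ distinct, PySem.Set.equal u a = true) (t : String) :
    ((∀ a ∈ tokens, t ∈ a) ↔
      distinct.countP (fun s => PySem.Set.contains s t) = distinct.length) := by
  rw [List.countP_eq_length]
  constructor
  · intro h u hu
    exact (PySem.Set.contains_iff u t).mpr (h u (hsub u hu))
  · intro h a ha
    obtain ⟨u, hu, hua⟩ := hcov a ha
    exact ((PySem.Set.equal_iff u a).mp hua t).mp ((PySem.Set.contains_iff u t).mp (h u hu))

-- Set.ofList commutes with filtering by a pointwise predicate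
lemma pv_add_foldl_filter (q : String → Bool) (xs acc : List String) :
    (xs.filter q).foldl PySem.Set.add (List.filter q acc) =
      List.filter q (xs.foldl PySem.Set.add acc) := by
  induction xs generalizing acc with
  | nil => simp
  | cons x xs ih =>
    by_cases hq : q x = true
    · rw [List.filter_cons_of_pos hq, List.foldl_cons, List.foldl_cons]
      by_cases hm : x ∈ acc
      · rw [PySem.Set.add_of_mem hm, PySem.Set.add_of_mem (List.mem_filter.mpr ⟨hm, hq⟩)]
        exact ih acc
      · rw [PySem.Set.add_of_not_mem hm,
          PySem.Set.add_of_not_mem (fun hc => hm (List.mem_of_mem_filter hc))]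
        have hstep : List.filter q acc ++ [x] = List.filter q (acc ++ [x]) := by
          rw [List.filter_append, List.filter_cons_of_pos hq, List.filter_nil]
        rw [hstep]
        exact ih (acc ++ [x])
    · rw [List.filter_cons_of_neg hq, List.foldl_cons]
      by_cases hm : x ∈ acc
      · rw [PySem.Set.add_of_mem hm]
        exact ih acc
      · rw [PySem.Set.add_of_not_mem hm]
        have hstep : List.filter q acc = List.filter q (acc ++ [x]) := by
          rw [List.filter_append, List.filter_cons_of_neg hq, List.filter_nil, List.append_nil]
        rw [hstep]
        exact ih (acc ++ [x])

lemma pv_ofList_filter (q : String → Bool) (xs : List String) :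
    PySem.Set.ofList (xs.filter q) = List.filter q (PySem.Set.ofList xs) := by
  rw [PySem.Set.ofList_eq_foldl, PySem.Set.ofList_eq_foldl]
  simpa using pv_add_foldl_filter q xs []

-- the normalised dict has Nodup keys
lemma pv_pvDict_keys_nodup (doc_texts : List (String × List String)) :
    ((pvDict doc_texts).items.map (fun p => p.1)).Nodup := by
  have := PySem.Dict.nodup_keys_foldl_insert_key doc_texts (fun p => p.1)
    (fun _ p => p.2) (PySem.Dict.empty : PySem.Dict String (List String)) (by simp [pysem])
  simpa [pvDict, PySem.Dict.keys] using this

-- a nonempty argument gives a nonempty normalised dict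
lemma pv_pvDict_items_ne_nil (doc_texts : List (String × List String))
    (h : doc_texts ≠ []) : (pvDict doc_texts).items ≠ [] := by
  intro hnil
  have hk := PySem.Dict.keys_foldl_insert_key doc_texts (fun p => p.1)
    (fun _ p => p.2) (PySem.Dict.empty : PySem.Dict String (List String))
  rcases doc_texts with _ | ⟨p, rest⟩
  · exact h rfl
  · have : p.1 ∈ (pvDict (p :: rest)).keys := by
      rw [pvDict, hk]
      rw [PySem.Set.mem_update]
      simp [pysem]
    rw [PySem.Dict.keys, hnil] at this
    simp at this

-- ===== VERDICT (by name: the statement is the Claim_ definition above) =====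
theorem global_common_words_spec : Claim_equal_global_common_words := by
  intro doc_texts _ hpre
  unfold Spec_global_common_words global_common_words global_common_words_alt
  have hnd := pv_pvDict_keys_nodup doc_texts
  have hne := pv_pvDict_items_ne_nil doc_texts hpre
  set items := (pvDict doc_texts).items with hitems
  set tokens := pvTokens items with htokens
  set distinct := pvDistinct items with hdistinct
  -- A's final dict loop inserts fresh keys in order
  rw [PySem.Dict.items_foldl_insert_fresh items (fun p => p.1)
      (fun p => pvToDelete (pvGI tokens) (pvSI tokens) p) PySem.Dict.empty
      (fun a _ => by simp [pysem]) hnd]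
  have hemp : (PySem.Dict.empty : PySem.Dict String (PySem.Set String)).items = [] := by
    simp [PySem.Dict.empty]
  rw [hemp, List.nil_append]
  -- shared facts about tokens / distinct
  have htne : tokens ≠ [] := by
    rw [htokens, pvTokens]
    simpa using hne
  obtain ⟨t0, rest, htok⟩ := List.exists_cons_of_ne_nil htne
  have hdis : distinct = tokens.foldl
      (fun acc s => if acc.any (fun u => PySem.Set.equal u s) then acc else acc ++ [s]) [] := by
    rw [hdistinct, htokens, pvTokens, pvDistinct, List.foldl_map]
  have hsub : ∀ u ∈ distinct, u ∈ tokens := by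
    intro u hu
    rw [hdis] at hu
    rcases pv_distinct_sub tokens [] u hu with h | h
    · cases h
    · exact h
  have hcov : ∀ a ∈ tokens, ∃ u ∈ distinct, PySem.Set.equal u a = true := by
    rw [hdis]
    exact pv_distinct_cover tokens []
  have hpw : distinct.Pairwise (fun u v => ¬(PySem.Set.equal u v = true)) := by
    rw [hdis]
    exact pv_distinct_pairwise tokens [] List.Pairwise.nil
  have hnods : ∀ s ∈ distinct, List.Nodup s := by
    intro s hs
    have hst : s ∈ tokens := hsub s hs
    rw [htokens, pvTokens] at hst
    obtain ⟨q, _, rfl⟩ := List.mem_map.mp hst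
    exact PySem.Set.nodup_ofList _
  have hfreq : ∀ t, (pvFreq distinct).getD t 0
      = ((distinct.countP (fun s => PySem.Set.contains s t) : Nat) : Int) := by
    intro t
    rw [pvFreq, pv_freq_getD, pv_sum_count distinct t hnods]
    simp [pysem]
  -- pointwise over the docs
  refine List.map_congr_left ?_
  intro p hp
  have hsmem : PySem.Set.ofList p.2 ∈ tokens := by
    rw [htokens, pvTokens]
    exact List.mem_map_of_mem hp
  have hXY : pvToDelete (pvGI tokens) (pvSI tokens) p
      = PySem.Set.ofList (p.2.filter
          (fun t => decide (2 ≤ (pvFreq distinct).getD t 0) &&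
                    decide ((pvFreq distinct).getD t 0 < (distinct.length : Int)))) := by
    rw [pvToDelete]
    rw [PySem.Set.diff.eq_1, pv_ofList_filter]
    refine List.filter_congr ?_
    intro x hxs
    -- characterisations of A's two global sets at x
    have hgi_iff : x ∈ pvGI tokens ↔
        2 ≤ distinct.countP (fun s => PySem.Set.contains s x) := by
      rw [← pv_gi_count tokens distinct hsub hcov hpw x, pvGI, pv_mem_gi]
      constructor
      · rintro (h | h)
        · cases h
        · exact h
      · exact Or.inr
    have hsi_iff : x ∈ pvSI tokens ↔ ∀ a ∈ tokens, x ∈ a := by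
      rw [htok]
      show x ∈ rest.foldl PySem.Set.inter t0 ↔ _
      rw [pv_mem_si, List.forall_mem_cons]
    have hsi_cnt : x ∈ pvSI tokens ↔
        distinct.countP (fun s => PySem.Set.contains s x) = distinct.length :=
      hsi_iff.trans (pv_si_count tokens distinct hsub hcov x)
    set c := distinct.countP (fun s => PySem.Set.contains s x) with hcdef
    have hcle : c ≤ distinct.length := List.countP_le_length
    set ntd := PySem.Set.union (PySem.Set.diff (PySem.Set.ofList p.2) (pvGI tokens))
        (pvSI tokens) with hntd
    have hmem : PySem.Set.contains ntd x = true ↔ (2 ≤ c → c = distinct.length) := by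
      rw [hntd, PySem.Set.contains_iff, PySem.Set.mem_union, PySem.Set.mem_diff,
        hgi_iff, hsi_cnt]
      constructor
      · rintro (⟨_, hngi⟩ | hsi) h2
        · exact absurd h2 hngi
        · exact hsi
      · intro himp
        by_cases h2 : 2 ≤ c
        · exact Or.inr (himp h2)
        · exact Or.inl ⟨hxs, h2⟩
    rw [hfreq x]
    by_cases hP : 2 ≤ c ∧ c < distinct.length
    · have hfalse : PySem.Set.contains ntd x = false := by
        cases hcc : PySem.Set.contains ntd x
        · rfl
        · exact absurd (hmem.mp hcc hP.1) (by omega)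
      rw [hfalse,
        decide_eq_true (show (2 : Int) ≤ (c : Int) by exact_mod_cast hP.1),
        decide_eq_true (show ((c : Nat) : Int) < ((distinct.length : Nat) : Int) by
          exact_mod_cast hP.2)]
      rfl
    · have htrue : PySem.Set.contains ntd x = true := hmem.mpr (by omega)
      rw [htrue]
      by_cases h2 : 2 ≤ c
      · have hnlt : ¬ c < distinct.length := fun hlt => hP ⟨h2, hlt⟩
        rw [decide_eq_false (show ¬ (((c : Nat) : Int) < ((distinct.length : Nat) : Int)) by
            exact_mod_cast hnlt), Bool.and_false]
        rfl
      · rw [decide_eq_false (show ¬ ((2 : Int) ≤ ((c : Nat) : Int)) by exact_mod_cast h2),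
          Bool.false_and]
        rfl
  exact congrArg (Prod.mk p.1) hXY
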